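-- pv_equiv track=rewrite | github.com/ftatiana-nv/NeMo-Retriever | nemo_retriever/src/nemo_retriever/relational_db/population/graph/search.py | filter_special_characters
-- ===== SOURCE A (Python) =====
-- def filter_special_characters(input_string: str) -> str:
--     for ch in [
--         "\\",
--         "/",
--         "#",
--         "%",
--         "*",
--         ",",
--         '"',
--         "$",
--         "&",
--         "?",
--         "!",
--         "@",
--         "^",
--         "<",
--         ">",
--         "|",
--         "+",
--         ":",
--         ";",
--         "~",
--     ]:
--         if ch in input_string:
--             input_string = input_string.replace(ch, " ")
--     return input_string
-- ===== SOURCE B (Python) =====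
-- SPECIALS = frozenset('\\/#%*,"$&?!@^<>|+:;~')
--
--
-- def filter_special_characters(input_string: str) -> str:
--     return ''.join(' ' if c in SPECIALS else c for c in input_string)
-- ===== Notes on version B (the rewrite author's own statement) =====
-- stated objective: idiomatic
-- what changed: Instead of 20 sequential whole-string replace passes (one per special character), B makes a single pass over the input, emitting a space for characters found in a precomputed frozenset.
import Mathlib
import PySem

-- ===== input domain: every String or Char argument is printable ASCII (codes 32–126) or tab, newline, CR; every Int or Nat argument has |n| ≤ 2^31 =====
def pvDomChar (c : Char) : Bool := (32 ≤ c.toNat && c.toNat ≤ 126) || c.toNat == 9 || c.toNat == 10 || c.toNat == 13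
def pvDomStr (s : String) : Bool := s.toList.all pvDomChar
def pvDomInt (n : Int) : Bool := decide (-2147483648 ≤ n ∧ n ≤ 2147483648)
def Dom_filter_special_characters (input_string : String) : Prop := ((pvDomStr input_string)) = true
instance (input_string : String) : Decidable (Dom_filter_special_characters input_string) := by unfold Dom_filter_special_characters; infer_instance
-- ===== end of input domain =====

-- B replaces A's 20 sequential whole-string replace passes with one pass over the
-- input using a precomputed character set (idiomatic single-traversal rewrite).


-- ===== PORT A =====
-- the literal list of 20 one-character strings from A's for-loop
def specialsA : List String :=
  ["\\", "/", "#", "%", "*", ",", "\"", "$", "&", "?", "!", "@", "^", "<", ">", "|", "+", ":", ";", "~"]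

def filter_special_characters (input_string : String) : String :=
  specialsA.foldl
    (fun acc ch => if PySem.Str.isIn ch acc then PySem.Str.replace acc ch " " else acc)
    input_string

-- ===== PORT B =====
-- SPECIALS = frozenset('\\/#%*,"$&?!@^<>|+:;~')
def specialsB : PySem.Set Char := PySem.Set.ofList "\\/#%*,\"$&?!@^<>|+:;~".toList

-- ''.join(' ' if c in SPECIALS else c for c in input_string)
def filter_special_characters_alt (input_string : String) : String :=
  String.ofList
    (PySem.Chars.join []
      ((input_string.toList.map (fun c => if specialsB.contains c then ' ' else c)).map ([·])))

-- ===== PRECONDITION & SPEC =====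
def Spec_filter_special_characters (input_string : String) (out : String) : Prop := out = filter_special_characters_alt input_string
instance (input_string : String) (out : String) : Decidable (Spec_filter_special_characters input_string out) := by unfold Spec_filter_special_characters; infer_instance

-- ===== CLAIM (what is proved, stated in full; the proofs are below) =====
def Claim_equal_filter_special_characters : Prop := ∀ (input_string : String), Dom_filter_special_characters input_string → Spec_filter_special_characters input_string (filter_special_characters input_string)

-- ===== LEMMAS AND PROOFS =====

-- the 20 special characters, as characters
def specialChars : List Char :=
  ['\\', '/', '#', '%', '*', ',', '\"', '$', '&', '?', '!', '@', '^', '<', '>', '|', '+', ':', ';', '~']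

theorem replace_go_single (c : Char) :
    ∀ (fuel : Nat) (l acc : List Char), l.length ≤ fuel →
      PySem.Chars.replace.go [c] [' '] fuel l acc
        = acc.reverse ++ l.map (fun x => if x = c then ' ' else x) := by
  intro fuel
  induction fuel with
  | zero =>
      intro l acc h
      interval_cases hl : l.length
      · simp_all [List.length_eq_zero_iff.mp hl, PySem.Chars.replace.go]
  | succ n ih =>
      intro l acc h
      cases l with
      | nil => simp [PySem.Chars.replace.go]
      | cons c' t =>
          by_cases hc : c' = c
          · subst hc
            have hpre : List.isPrefixOf [c'] (c' :: t) = true := by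
              simp [List.isPrefixOf]
            rw [PySem.Chars.replace.go]
            simp only [hpre, if_true, List.length_cons, List.length_nil, List.drop_succ_cons,
              List.drop_zero, List.reverse_cons, List.reverse_nil, List.nil_append]
            rw [List.singleton_append, ih t (' ' :: acc) (by simpa using Nat.le_of_succ_le_succ h)]
            simp
          · have hpre : List.isPrefixOf [c] (c' :: t) = false := by
              simp [List.isPrefixOf]
              exact fun h' => absurd h'.symm hc
            rw [PySem.Chars.replace.go]
            simp only [hpre]
            rw [ih t (c' :: acc) (by simpa using Nat.le_of_succ_le_succ h)]
            simp [hc]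

theorem replace_single (c : Char) (l : List Char) :
    PySem.Chars.replace l [c] [' '] = l.map (fun x => if x = c then ' ' else x) := by
  rw [PySem.Chars.replace]
  simp only [List.isEmpty_cons, Bool.false_eq_true, if_false]
  exact replace_go_single c l.length l [] le_rfl

-- one step of A's loop, at the list level (the guard is redundant)
theorem step_single (c : Char) (l : List Char) :
    (if PySem.Chars.isIn [c] l then PySem.Chars.replace l [c] [' '] else l)
      = l.map (fun x => if x = c then ' ' else x) := by
  by_cases h : PySem.Chars.isIn [c] l = true
  · simp [h, replace_single]
  · have hnm : c ∉ l := by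
      intro hmem
      exact h ((PySem.Chars.isIn_iff_infix [c] l).mpr ((List.singleton_infix_iff c l).mpr hmem))
    rw [if_neg h]
    conv_lhs => rw [← List.map_id l]
    exact List.map_congr_left (fun x hx => by
      have hxc : x ≠ c := fun e => hnm (e ▸ hx)
      simp [hxc])

-- composed per-character substitution over a list of specials (none of which is a space)
theorem foldl_map_subst (cs : List Char) (hsp : ' ' ∉ cs) :
    ∀ l : List Char,
      cs.foldl (fun acc c => acc.map (fun x => if x = c then ' ' else x)) l
        = l.map (fun x => if x ∈ cs then ' ' else x) := by
  induction cs with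
  | nil => intro l; simp
  | cons c cs ih =>
      intro l
      have hsp' : ' ' ∉ cs := fun h => hsp (List.mem_cons_of_mem _ h)
      have hne : (' ' : Char) ≠ c := fun h => hsp (h ▸ List.mem_cons_self)
      simp only [List.foldl_cons]
      rw [ih hsp', List.map_map]
      apply List.map_congr_left
      intro x _
      by_cases hx : x = c
      · subst hx
        simp [hsp', List.mem_cons]
      · simp [hx, List.mem_cons]

-- one step of A's loop, at the string level
theorem step_str (c : Char) (acc : String) :
    (if PySem.Str.isIn (String.ofList [c]) acc then PySem.Str.replace acc (String.ofList [c]) " " else acc)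
      = String.ofList (acc.toList.map (fun x => if x = c then ' ' else x)) := by
  rw [← step_single c acc.toList]
  by_cases h : PySem.Chars.isIn [c] acc.toList = true
  · have h' : PySem.Str.isIn (String.ofList [c]) acc = true := by simpa using h
    rw [if_pos h', if_pos h]
    simp [PySem.Str.replace]
  · have h' : ¬ PySem.Str.isIn (String.ofList [c]) acc = true := by simpa using h
    rw [if_neg h', if_neg h, String.ofList_toList]

-- A's whole loop, pushed to the list level
theorem fold_eq (cs : List Char) :
    ∀ acc : String,
      (cs.map (fun c => String.ofList [c])).foldl
          (fun acc ch => if PySem.Str.isIn ch acc then PySem.Str.replace acc ch " " else acc) acc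
        = String.ofList
            (cs.foldl (fun L c => L.map (fun x => if x = c then ' ' else x)) acc.toList) := by
  induction cs with
  | nil => intro acc; simp [String.ofList_toList]
  | cons c cs ih =>
      intro acc
      simp only [List.map_cons, List.foldl_cons]
      rw [step_str, ih]
      simp

-- ===== VERDICT (by name: the statement is the Claim_ definition above) =====
set_option maxRecDepth 4096 in
theorem filter_special_characters_spec : Claim_equal_filter_special_characters := by
  intro s _
  unfold Spec_filter_special_characters filter_special_characters filter_special_characters_alt
  have hA : specialsA = specialChars.map (fun c => String.ofList [c]) := by decide
  rw [hA, fold_eq, foldl_map_subst specialChars (by decide)]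
  rw [PySem.Chars.join_nil_singletons]
  congr 1
  apply List.map_congr_left
  intro x _
  have hs : ("\\/#%*,\"$&?!@^<>|+:;~" : String).toList = specialChars := by decide
  have hc : specialsB.contains x = true ↔ x ∈ specialChars := by
    unfold specialsB
    rw [PySem.Set.contains_iff, PySem.Set.mem_ofList, hs]
  by_cases hx : x ∈ specialChars
  · rw [if_pos hx, if_pos (hc.mpr hx)]
  · rw [if_neg hx, if_neg (fun h => hx (hc.mp h))]
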